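-- pv_equiv track=rewrite | github.com/rddrdhd/advent_of_code | y2023/day13.py | find_smudged_mirror
-- ===== SOURCE A (Python) =====
-- def find_smudged_mirror(grid):
--     for col in range(1, len(grid)):
--         left_part = grid[col:]
--         right_part = grid[:col][::-1]
--
--         smudges_count = 0
--
--         for mirror_l, mirror_r in zip(left_part, right_part):
--             for l, r in zip(mirror_l,mirror_r):
--                 if l != r:
--                     smudges_count += 1
--
--         if smudges_count == 1:
--             return col
--
--     return 0 # the other direction
-- ===== SOURCE B (Python) =====
-- def find_smudged_mirror(grid):
--     # Pair-major strategy: every pair of rows (i, j) with odd i + j lies on exactly one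
--     # candidate mirror axis col = (i + j + 1) // 2.  Accumulate each pair's character
--     # mismatch count into a histogram indexed by axis, then scan the histogram once.
--     n = len(grid)
--     counts = [0] * (n + 1)
--     for j in range(n):
--         gj = grid[j]
--         for i in range((j + 1) % 2, j, 2):  # only i with i + j odd
--             counts[(i + j + 1) // 2] += sum(map(str.__ne__, grid[i], gj))
--     for col in range(1, n):
--         if counts[col] == 1:
--             return col
--     return 0
-- ===== Notes on version B (the rewrite author's own statement) =====
-- stated objective: alternative
-- what changed: Replaces A's per-axis slice/reverse/zip recount with a pair-major pass: every odd-sum row pair's mismatch count is bucketed once into a per-axis histogram, which is then scanned for the first axis with count 1.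
import Mathlib
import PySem

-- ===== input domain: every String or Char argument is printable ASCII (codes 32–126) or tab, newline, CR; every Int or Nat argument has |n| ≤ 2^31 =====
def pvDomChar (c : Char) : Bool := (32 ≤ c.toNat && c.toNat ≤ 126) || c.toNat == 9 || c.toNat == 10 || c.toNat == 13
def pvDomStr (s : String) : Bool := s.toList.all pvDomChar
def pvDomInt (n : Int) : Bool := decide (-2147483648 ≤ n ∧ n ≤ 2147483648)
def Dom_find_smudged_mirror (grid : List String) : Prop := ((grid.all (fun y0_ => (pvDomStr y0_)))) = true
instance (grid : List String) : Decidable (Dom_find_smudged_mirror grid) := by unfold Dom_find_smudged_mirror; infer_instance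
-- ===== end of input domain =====

-- B replaces A's per-axis slice/reverse/zip recount with a pair-major pass that buckets
-- each odd-sum row pair's mismatch count into a per-axis histogram, then scans it; no speed claimed.

-- ===== PORT A =====
-- A's nested count for one axis: one counter threaded through all mirrored row pairs and their chars.
def pvSmudgeA (L R : List (List Char)) : Nat :=
  (L.zip R).foldl
    (fun c p => (p.1.zip p.2).foldl (fun c q => if q.1 ≠ q.2 then c + 1 else c) c) 0

-- the 'for col in range(1, len(grid))' loop with early return
def pvGoA (g : List (List Char)) : List Nat → Int
  | [] => 0
  | col :: rest =>
      if pvSmudgeA (g.drop col) ((g.take col).reverse) = 1 then (col : Int)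
      else pvGoA g rest

def find_smudged_mirror (grid : List String) : Int :=
  pvGoA (grid.map String.toList) (List.range' 1 (grid.length - 1))

-- ===== PORT B =====
-- sum(a != b for a, b in zip(grid[i], grid[j]))
def pvRowDiff (a b : List Char) : Nat := (a.zip b).countP (fun q => q.1 != q.2)

-- the double loop filling counts ('for j in range(n): for i in range((j+1)%2, j, 2): …');
-- 'range((j+1)%2, j, 2)' has (j - (j+1)%2 + 1) / 2 elements (exact: start ≤ j, step 2),
-- and indices i, j are always in range, so getD is exact here
def pvCounts (g : List (List Char)) (n : Nat) : List Nat :=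
  (List.range n).foldl
    (fun cs j =>
      (List.range' ((j + 1) % 2) ((j - (j + 1) % 2 + 1) / 2) 2).foldl
        (fun cs i =>
          cs.set ((i + j + 1) / 2)
            (cs.getD ((i + j + 1) / 2) 0 + pvRowDiff (g.getD i []) (g.getD j [])))
        cs)
    (List.replicate (n + 1) 0)

-- 'for col in range(1, n): if counts[col] == 1: return col' then 'return 0'
def pvScan (counts : List Nat) : List Nat → Int
  | [] => 0
  | col :: rest => if counts.getD col 0 = 1 then (col : Int) else pvScan counts rest

def find_smudged_mirror_alt (grid : List String) : Int :=
  let g := grid.map String.toList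
  pvScan (pvCounts g g.length) (List.range' 1 (g.length - 1))

-- ===== PRECONDITION & SPEC =====
def Spec_find_smudged_mirror (grid : List String) (out : Int) : Prop := out = find_smudged_mirror_alt grid
instance (grid : List String) (out : Int) : Decidable (Spec_find_smudged_mirror grid out) := by unfold Spec_find_smudged_mirror; infer_instance

-- ===== CLAIM =====
def Claim_equal_find_smudged_mirror : Prop := ∀ (grid : List String), Dom_find_smudged_mirror grid → Spec_find_smudged_mirror grid (find_smudged_mirror grid)

-- ===== LEMMAS AND PROOFS =====

theorem pvRowDiff_comm (a b : List Char) : pvRowDiff a b = pvRowDiff b a := by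
  unfold pvRowDiff
  rw [← List.zip_swap b a, List.countP_map]
  apply List.countP_congr
  intro q _
  simp [Function.comp, bne_comm]

-- A's smudge count for axis col as a Finset sum over the mirrored pair index k
theorem pvInnerFold_shift (l : List (Char × Char)) (c : Nat) :
    l.foldl (fun c q => if q.1 ≠ q.2 then c + 1 else c) c
      = c + l.countP (fun q => q.1 != q.2) := by
  induction l generalizing c with
  | nil => simp
  | cons a l ih =>
      by_cases h : a.1 = a.2
      · rw [List.foldl_cons, if_neg (by simp [h]), ih, List.countP_cons]; simp [h]
      · rw [List.foldl_cons, if_pos h, ih, List.countP_cons]; simp [h]; omega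

theorem pvSmudgeA_eq_sum (L R : List (List Char)) :
    pvSmudgeA L R = ((L.zip R).map (fun p => pvRowDiff p.1 p.2)).sum := by
  unfold pvSmudgeA
  generalize L.zip R = ps
  have aux : ∀ (ps : List (List Char × List Char)) (c : Nat),
      ps.foldl (fun c p => (p.1.zip p.2).foldl (fun c q => if q.1 ≠ q.2 then c + 1 else c) c) c
        = c + (ps.map (fun p => pvRowDiff p.1 p.2)).sum := by
    intro ps
    induction ps with
    | nil => simp
    | cons p ps ih =>
        intro c
        rw [List.foldl_cons, ih]
        simp only [List.map_cons, List.sum_cons, pvInnerFold_shift, pvRowDiff]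
        omega
  simpa using aux ps 0

theorem pvZip_drop_take (g : List (List Char)) (col : Nat) (hcol : col ≤ g.length) :
    ((g.drop col).zip ((g.take col).reverse)).map (fun p => pvRowDiff p.1 p.2)
      = (List.range (min (g.length - col) col)).map
          (fun k => pvRowDiff (g.getD (col + k) []) (g.getD (col - 1 - k) [])) := by
  apply List.ext_getElem
  · simp
    omega
  · intro k h1 h2
    simp only [List.length_map, List.length_zip, List.length_drop, List.length_reverse,
      List.length_take, List.length_range, lt_min_iff] at h1 h2
    have hkl : k < g.length - col := by omega
    have hkr : k < col := by omega
    have h1' : col + k < g.length := by omega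
    have h2' : col - 1 - k < g.length := by omega
    have hrevlen : k < ((g.take col).reverse).length := by simp; omega
    have hrev : ((g.take col).reverse)[k]'hrevlen = g[col - 1 - k]'h2' := by
      rw [List.getElem_reverse]
      rw [List.getElem_take]
      congr 1
      simp
      omega
    simp only [List.getElem_map, List.getElem_zip, List.getElem_drop]
    rw [hrev]
    simp [List.getD, List.getElem?_eq_getElem h1', List.getElem?_eq_getElem h2']

-- generic histogram lemma for B's bucket update over a list of pairs
def pvStep (g : List (List Char)) (cs : List Nat) (p : Nat × Nat) : List Nat :=
  cs.set ((p.1 + p.2 + 1) / 2)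
    (cs.getD ((p.1 + p.2 + 1) / 2) 0 + pvRowDiff (g.getD p.1 []) (g.getD p.2 []))

theorem pvStep_length (g : List (List Char)) (cs : List Nat) (p : Nat × Nat) :
    (pvStep g cs p).length = cs.length := by
  unfold pvStep; simp

theorem pvStep_getD (g : List (List Char)) (cs : List Nat) (p : Nat × Nat) (c : Nat)
    (hidx : (p.1 + p.2 + 1) / 2 < cs.length) :
    (pvStep g cs p).getD c 0
      = cs.getD c 0 + (if (p.1 + p.2 + 1) / 2 = c
          then pvRowDiff (g.getD p.1 []) (g.getD p.2 []) else 0) := by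
  unfold pvStep
  by_cases hc : (p.1 + p.2 + 1) / 2 = c
  · subst hc
    simp [List.getD, List.getElem?_set_self hidx, List.getElem?_eq_getElem hidx]
  · simp [List.getD, List.getElem?_set_ne hc, hc]

theorem pvFoldStep_getD (g : List (List Char)) (L : List (Nat × Nat)) (cs : List Nat) (c : Nat)
    (hidx : ∀ p ∈ L, (p.1 + p.2 + 1) / 2 < cs.length) :
    (L.foldl (pvStep g) cs).getD c 0
      = cs.getD c 0 + (L.map (fun p => if (p.1 + p.2 + 1) / 2 = c
          then pvRowDiff (g.getD p.1 []) (g.getD p.2 []) else 0)).sum := by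
  induction L generalizing cs with
  | nil => simp
  | cons p L ih =>
      rw [List.foldl_cons, ih, pvStep_getD g cs p c (hidx p (by simp))]
      · simp; omega
      · intro q hq; rw [pvStep_length]; exact hidx q (by simp [hq])

-- list-sum over range as a Finset sum
theorem pvSumRange (n : Nat) (f : Nat → Nat) :
    ((List.range n).map f).sum = ∑ i ∈ Finset.range n, f i := by
  induction n with
  | zero => rfl
  | succ n ih => rw [List.range_succ, List.map_append, List.sum_append,
      Finset.sum_range_succ, ih]; simp

-- B's inner loop over i for fixed j: at most one i contributes to axis c
theorem pvRange'_two (m : Nat) : ∀ s : Nat, List.range' s m 2 = (List.range m).map (fun k => s + 2 * k) := by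
  induction m with
  | zero => intro s; rfl
  | succ m ih =>
      intro s
      rw [List.range'_succ, ih (s + 2), List.range_succ_eq_map]
      simp [List.map_map, Function.comp]
      intro a _
      omega

theorem pvInner_sum (g : List (List Char)) (j c : Nat) :
    ((List.range' ((j + 1) % 2) ((j - (j + 1) % 2 + 1) / 2) 2).map
        (fun i => if (i + j + 1) / 2 = c
          then pvRowDiff (g.getD i []) (g.getD j []) else 0)).sum
      = if c ≤ j ∧ j + 1 ≤ 2 * c
          then pvRowDiff (g.getD (2 * c - 1 - j) []) (g.getD j []) else 0 := by
  rw [pvRange'_two, List.map_map, pvSumRange]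
  have hcond : ∀ k ∈ Finset.range ((j - (j + 1) % 2 + 1) / 2),
      ((fun i => if (i + j + 1) / 2 = c
          then pvRowDiff (g.getD i []) (g.getD j []) else 0) ∘ (fun k => (j + 1) % 2 + 2 * k)) k
      = (if k = c - ((j + 1) % 2 + j + 1) / 2 ∧ (c ≤ j ∧ j + 1 ≤ 2 * c)
          then pvRowDiff (g.getD ((j + 1) % 2 + 2 * k) []) (g.getD j []) else 0) := by
    intro k hk
    have hkm := Finset.mem_range.mp hk
    simp only [Function.comp]
    congr 1
    apply propext
    constructor
    · intro h1; omega
    · rintro ⟨h1, h2, h3⟩; omega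
  rw [Finset.sum_congr rfl hcond]
  by_cases hj : c ≤ j ∧ j + 1 ≤ 2 * c
  · have hmem : c - ((j + 1) % 2 + j + 1) / 2 ∈ Finset.range ((j - (j + 1) % 2 + 1) / 2) := by
      apply Finset.mem_range.mpr; omega
    rw [if_pos hj,
      Finset.sum_eq_single_of_mem (c - ((j + 1) % 2 + j + 1) / 2) hmem (fun b _ hb => by simp [hb])]
    rw [if_pos ⟨rfl, hj⟩]
    have hi : (j + 1) % 2 + 2 * (c - ((j + 1) % 2 + j + 1) / 2) = 2 * c - 1 - j := by omega
    rw [hi]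
  · rw [if_neg hj]
    apply Finset.sum_eq_zero
    intro i _
    exact if_neg (fun h' => hj h'.2)

-- the histogram entry at axis c equals A's smudge count for axis c
theorem pvCounts_getD (g : List (List Char)) (c : Nat) (hc : 1 ≤ c) (hcn : c < g.length) :
    (pvCounts g g.length).getD c 0
      = pvSmudgeA (g.drop c) ((g.take c).reverse) := by
  -- flatten the double loop into one fold over the pair list
  have hflat : ∀ (m : Nat) (cs : List Nat), (List.range m).foldl
      (fun cs j => (List.range' ((j + 1) % 2) ((j - (j + 1) % 2 + 1) / 2) 2).foldl
        (fun cs i => pvStep g cs (i, j)) cs) cs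
      = ((List.range m).flatMap (fun j =>
          (List.range' ((j + 1) % 2) ((j - (j + 1) % 2 + 1) / 2) 2).map (fun i => (i, j)))).foldl
          (pvStep g) cs := by
    intro m
    induction m with
    | zero => intro cs; rfl
    | succ m ih =>
        intro cs
        rw [List.range_succ, List.foldl_append, List.flatMap_append, List.foldl_append, ih]
        simp [List.foldl_map]
  have hcounts : pvCounts g g.length
      = ((List.range g.length).flatMap (fun j =>
          (List.range' ((j + 1) % 2) ((j - (j + 1) % 2 + 1) / 2) 2).map (fun i => (i, j)))).foldl
          (pvStep g) (List.replicate (g.length + 1) 0) := by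
    unfold pvCounts
    rw [← hflat]
    rfl
  rw [hcounts]
  rw [pvFoldStep_getD]
  · -- compute the flatMap sum
    rw [List.map_flatMap]
    have hsumflat : ∀ (L : List Nat) (f : Nat → List Nat),
        (L.flatMap f).sum = (L.map (fun j => (f j).sum)).sum := by
      intro L f
      induction L with
      | nil => rfl
      | cons a L ih => simp [List.flatMap_cons, ih]
    rw [hsumflat]
    have hinner : ∀ j, ((((List.range' ((j + 1) % 2) ((j - (j + 1) % 2 + 1) / 2) 2)).map
          (fun i => (i, j))).map
        (fun p => if (p.1 + p.2 + 1) / 2 = c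
          then pvRowDiff (g.getD p.1 []) (g.getD p.2 []) else 0)).sum
        = if c ≤ j ∧ j + 1 ≤ 2 * c
            then pvRowDiff (g.getD (2 * c - 1 - j) []) (g.getD j []) else 0 := by
      intro j
      rw [List.map_map]
      exact pvInner_sum g j c
    -- outer sum over j
    have houter : ((List.range g.length).map (fun j =>
        ((((List.range' ((j + 1) % 2) ((j - (j + 1) % 2 + 1) / 2) 2)).map (fun i => (i, j))).map
        (fun p => if (p.1 + p.2 + 1) / 2 = c
          then pvRowDiff (g.getD p.1 []) (g.getD p.2 []) else 0)).sum)).sum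
        = ((List.range g.length).map (fun j => if c ≤ j ∧ j + 1 ≤ 2 * c
            then pvRowDiff (g.getD (2 * c - 1 - j) []) (g.getD j []) else 0)).sum := by
      congr 1
      exact List.map_congr_left (fun j _ => hinner j)
    rw [houter, pvSumRange, pvSmudgeA_eq_sum, pvZip_drop_take g c (le_of_lt hcn),
      pvSumRange]
    -- reindex the indicator sum over j to a sum over k = j - c
    rw [← Finset.sum_filter]
    have hfilter : (Finset.range g.length).filter (fun j => c ≤ j ∧ j + 1 ≤ 2 * c)
        = Finset.Ico c (min g.length (2 * c)) := by
      ext j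
      simp [Finset.mem_filter, Finset.mem_range, Finset.mem_Ico]
      omega
    rw [hfilter, Finset.sum_Ico_eq_sum_range]
    have hminlen : min g.length (2 * c) - c = min (g.length - c) c := by omega
    rw [hminlen]
    have hrep : (List.replicate (g.length + 1) (0 : Nat)).getD c 0 = 0 := by
      simp [List.getD]
    rw [hrep, Nat.zero_add]
    apply Finset.sum_congr rfl
    intro k hk
    have hkm : k < min (g.length - c) c := Finset.mem_range.mp hk
    have h2c : 2 * c - 1 - (c + k) = c - 1 - k := by omega
    rw [h2c, pvRowDiff_comm]
  · -- all bucket indices are in range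
    intro p hp
    rw [List.length_replicate]
    simp only [List.mem_flatMap, List.mem_map, List.mem_range, List.mem_range'] at hp
    obtain ⟨j, hj, i, ⟨k, hk, rfl⟩, rfl⟩ := hp
    simp only
    omega

-- scan vs A's early-return loop over the same axis list
theorem pvGoA_eq_scan (g : List (List Char)) (cols : List Nat)
    (h : ∀ c ∈ cols, 1 ≤ c ∧ c < g.length) :
    pvGoA g cols = pvScan (pvCounts g g.length) cols := by
  induction cols with
  | nil => rfl
  | cons col rest ih =>
      obtain ⟨h1, h2⟩ := h col (by simp)
      simp only [pvGoA, pvScan, pvCounts_getD g col h1 h2]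
      split
      · rfl
      · exact ih (fun c hc => h c (by simp [hc]))

-- ===== VERDICT =====
theorem find_smudged_mirror_spec : Claim_equal_find_smudged_mirror := by
  intro grid _
  unfold Spec_find_smudged_mirror find_smudged_mirror find_smudged_mirror_alt
  simp only
  rw [show grid.length = (List.map String.toList grid).length from (List.length_map _).symm]
  apply pvGoA_eq_scan
  intro c hc
  have := List.mem_range'_1.mp hc
  simp only [List.length_map] at this ⊢
  omega
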